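-- pv_equiv track=rewrite | github.com/daniel-reich/ubiquitous-fiesta | 8NyNftbNXd6CZCDXf_2.py | get_coin_balances
-- ===== SOURCE A (Python) =====
-- def get_coin_balances(lst1, lst2):
--     first, second = 3, 3
--     for m1, m2 in zip(lst1, lst2):
--         if m1 == "share":
--             first -= 1
--             second += 3
--         if m2 == "share":
--             second -= 1
--             first += 3
--     return [first, second]
-- ===== SOURCE B (Python) =====
-- def get_coin_balances(lst1, lst2):
--     pairs = list(zip(lst1, lst2))
--
--     def delta(lo, hi):
--         # net (d_first, d_second) contributed by pairs[lo:hi], divide and conquer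
--         if hi - lo == 0:
--             return (0, 0)
--         if hi - lo == 1:
--             m1, m2 = pairs[lo]
--             df, ds = 0, 0
--             if m1 == "share":
--                 df -= 1
--                 ds += 3
--             if m2 == "share":
--                 ds -= 1
--                 df += 3
--             return (df, ds)
--         mid = (lo + hi) // 2
--         dl = delta(lo, mid)
--         dr = delta(mid, hi)
--         return (dl[0] + dr[0], dl[1] + dr[1])
--
--     d = delta(0, len(pairs))
--     return [3 + d[0], 3 + d[1]]
-- ===== Notes on version B (the rewrite author's own statement) =====
-- stated objective: alternative
-- what changed: Replaces A's left-to-right accumulating loop by a divide-and-conquer recursion that computes the net (delta_first, delta_second) contribution of each half of the pair list and adds them, then adds the deltas to the initial balances (3,3); correct because the per-pair contributions are summed and addition is associative and commutative.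
import Mathlib
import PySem

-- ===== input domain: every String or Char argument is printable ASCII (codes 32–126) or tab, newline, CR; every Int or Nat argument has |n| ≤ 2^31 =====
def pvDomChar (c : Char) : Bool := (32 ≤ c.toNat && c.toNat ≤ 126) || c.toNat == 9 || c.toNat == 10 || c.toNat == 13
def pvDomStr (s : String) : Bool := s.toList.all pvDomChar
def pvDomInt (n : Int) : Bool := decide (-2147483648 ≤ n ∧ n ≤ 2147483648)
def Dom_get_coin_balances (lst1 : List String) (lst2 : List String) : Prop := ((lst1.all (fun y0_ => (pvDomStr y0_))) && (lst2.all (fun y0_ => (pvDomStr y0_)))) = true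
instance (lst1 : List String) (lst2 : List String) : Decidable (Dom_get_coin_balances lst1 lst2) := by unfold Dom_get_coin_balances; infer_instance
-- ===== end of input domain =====

-- B replaces A's accumulating loop by a divide-and-conquer recursion summing per-half delta vectors (objective: alternative).

-- ===== PORT A =====
def get_coin_balances (lst1 : List String) (lst2 : List String) : List Int :=
  let s := (List.zip lst1 lst2).foldl
    (fun (p : Int × Int) mm =>
      let q := if mm.1 = "share" then (p.1 - 1, p.2 + 3) else p
      if mm.2 = "share" then (q.1 + 3, q.2 - 1) else q)
    (3, 3)
  [s.1, s.2]

-- ===== PORT B =====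
-- 'pairs[lo]' is ported as 'pairs.getD lo ("", "")': B only calls it with lo < pairs.length,
-- where getD is exactly Python's indexing.
def gcbDelta (pairs : List (String × String)) (lo hi : Nat) : Int × Int :=
  if hi - lo = 0 then (0, 0)
  else if hi - lo = 1 then
    let mm := pairs.getD lo ("", "")
    let q : Int × Int := if mm.1 = "share" then (0 - 1, 0 + 3) else (0, 0)
    if mm.2 = "share" then (q.1 + 3, q.2 - 1) else q
  else
    let mid := (lo + hi) / 2
    let dl := gcbDelta pairs lo mid
    let dr := gcbDelta pairs mid hi
    (dl.1 + dr.1, dl.2 + dr.2)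
termination_by hi - lo
decreasing_by all_goals omega

def get_coin_balances_alt (lst1 : List String) (lst2 : List String) : List Int :=
  let pairs := List.zip lst1 lst2
  let d := gcbDelta pairs 0 pairs.length
  [3 + d.1, 3 + d.2]

-- ===== PRECONDITION & SPEC =====
def Spec_get_coin_balances (lst1 : List String) (lst2 : List String) (out : List Int) : Prop := out = get_coin_balances_alt lst1 lst2
instance (lst1 : List String) (lst2 : List String) (out : List Int) : Decidable (Spec_get_coin_balances lst1 lst2 out) := by unfold Spec_get_coin_balances; infer_instance

-- ===== CLAIM (what is proved, stated in full; the proofs are below) =====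
def Claim_equal_get_coin_balances : Prop := ∀ (lst1 : List String) (lst2 : List String), Dom_get_coin_balances lst1 lst2 → Spec_get_coin_balances lst1 lst2 (get_coin_balances lst1 lst2)

-- ===== LEMMAS AND PROOFS =====

-- the per-pair delta vector (A's step applied to (0,0))
def pvD1 (mm : String × String) : Int :=
  (if mm.2 = "share" then ((if mm.1 = "share" then ((0:Int) - 1, (0:Int) + 3) else ((0:Int),(0:Int))).1 + 3, (if mm.1 = "share" then ((0:Int) - 1, (0:Int) + 3) else ((0:Int),(0:Int))).2 - 1) else (if mm.1 = "share" then ((0:Int) - 1, (0:Int) + 3) else ((0:Int),(0:Int)))).1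
def pvD2 (mm : String × String) : Int :=
  (if mm.2 = "share" then ((if mm.1 = "share" then ((0:Int) - 1, (0:Int) + 3) else ((0:Int),(0:Int))).1 + 3, (if mm.1 = "share" then ((0:Int) - 1, (0:Int) + 3) else ((0:Int),(0:Int))).2 - 1) else (if mm.1 = "share" then ((0:Int) - 1, (0:Int) + 3) else ((0:Int),(0:Int)))).2

-- A's loop from an arbitrary starting state: start plus the sums of the per-pair deltas
theorem gcb_foldA (z : List (String × String)) (f s : Int) :
    z.foldl
      (fun (p : Int × Int) mm =>
        let q := if mm.1 = "share" then (p.1 - 1, p.2 + 3) else p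
        if mm.2 = "share" then (q.1 + 3, q.2 - 1) else q)
      (f, s)
    = (f + (z.map pvD1).sum, s + (z.map pvD2).sum) := by
  induction z generalizing f s with
  | nil => simp
  | cons hd tl ih =>
    simp only [List.foldl_cons, List.map_cons, List.sum_cons]
    by_cases h1 : hd.1 = "share" <;> by_cases h2 : hd.2 = "share" <;>
      simp [h1, h2, ih, pvD1, pvD2, Prod.ext_iff] <;> constructor <;> ring

-- B's divide-and-conquer delta equals the sum of per-pair deltas over the slice
theorem gcbDelta_leaf (pairs : List (String × String)) (lo hi : Nat)
    (h1 : hi - lo = 1) (h : hi ≤ pairs.length) :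
    gcbDelta pairs lo hi
      = ((((pairs.drop lo).take (hi - lo)).map pvD1).sum,
         (((pairs.drop lo).take (hi - lo)).map pvD2).sum) := by
  have h0 : ¬ hi - lo = 0 := by omega
  have hlt : lo < pairs.length := by omega
  have hdrop : (pairs.drop lo).take (hi - lo) = [pairs[lo]] := by
    rw [h1, List.take_one]
    simp [List.head?_drop, List.getElem?_eq_getElem hlt]
  have hg : pairs.getD lo ("", "") = pairs[lo] := by
    simp [List.getD, List.getElem?_eq_getElem hlt]
  rw [gcbDelta, if_neg h0, if_pos h1, hdrop]
  simp only [hg, List.map_cons, List.map_nil, List.sum_cons, List.sum_nil]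
  by_cases hA : pairs[lo].1 = "share" <;> by_cases hB : pairs[lo].2 = "share" <;>
    simp [hA, hB, pvD1, pvD2]

theorem gcbDelta_eq (pairs : List (String × String)) (lo hi : Nat)
    (h : hi ≤ pairs.length) :
    gcbDelta pairs lo hi
      = ((((pairs.drop lo).take (hi - lo)).map pvD1).sum,
         (((pairs.drop lo).take (hi - lo)).map pvD2).sum) := by
  induction lo, hi using gcbDelta.induct pairs with
  | case1 lo hi h0 =>
    rw [gcbDelta]
    simp [h0]
  | case2 lo hi h0 h1 _ => exact gcbDelta_leaf pairs lo hi h1 h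
  | case3 lo hi h0 h1 _ => exact gcbDelta_leaf pairs lo hi h1 h
  | case4 lo hi h0 h1 mid ihl ihr =>
    rw [gcbDelta, if_neg h0, if_neg h1]
    have hmid : mid = (lo + hi) / 2 := rfl
    rw [hmid] at ihl ihr
    have hmid1 : (lo + hi) / 2 ≤ pairs.length := by omega
    dsimp only
    rw [ihl hmid1, ihr h]
    have hs : (pairs.drop lo).take (hi - lo)
        = (pairs.drop lo).take ((lo + hi) / 2 - lo)
          ++ (pairs.drop ((lo + hi) / 2)).take (hi - (lo + hi) / 2) := by
      have e1 : hi - lo = ((lo + hi) / 2 - lo) + (hi - (lo + hi) / 2) := by omega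
      rw [e1, List.take_add, List.drop_drop]
      have e2 : lo + ((lo + hi) / 2 - lo) = (lo + hi) / 2 := by omega
      rw [e2]
    simp [hs]

-- ===== VERDICT (by name: the statement is the Claim_ definition above) =====
theorem get_coin_balances_spec : Claim_equal_get_coin_balances := by
  intro l1 l2 _
  unfold Spec_get_coin_balances get_coin_balances get_coin_balances_alt
  rw [gcb_foldA]
  have key := gcbDelta_eq (l1.zip l2) 0 (min l1.length l2.length)
    (le_of_eq (List.length_zip).symm)
  simp only [List.drop_zero, Nat.sub_zero,
    List.take_of_length_le (le_of_eq (List.length_zip))] at key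
  simp [key]
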